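-- pv_equiv track=rewrite | github.com/dolonet/wagstaff-chebyshev | scripts/survey.py | pow_T2
-- ===== SOURCE A (Python) =====
-- def pow_T2(n, r):
--     """ω₃^n = (3+2√2)^n mod r → (a, b) with a+b√2."""
--     a, b = 1, 0
--     ca, cb = 3 % r, 2 % r
--     while n > 0:
--         if n & 1:
--             a, b = (a*ca + 2*b*cb) % r, (a*cb + b*ca) % r
--         ca, cb = (ca*ca + 2*cb*cb) % r, 2*ca*cb % r
--         n >>= 1
--     return a, b
-- ===== SOURCE B (Python) =====
-- def pow_T2(n, r):
--     """(3+2*sqrt(2))^n mod r -> (a, b): recursive squaring of the RESULT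
--     (divide and conquer on the halved exponent) instead of an iterative
--     bit loop over a persistently squared base."""
--     if n <= 0:
--         return (1, 0)
--     pa, pb = pow_T2(n >> 1, r)
--     sa, sb = (pa*pa + 2*pb*pb) % r, (2*pa*pb) % r
--     if n & 1:
--         ba, bb = 3 % r, 2 % r
--         return ((sa*ba + 2*sb*bb) % r, (sa*bb + sb*ba) % r)
--     return (sa, sb)
-- ===== Notes on version B (the rewrite author's own statement) =====
-- stated objective: alternative
-- what changed: Replaces A's iterative bit-scanning loop (accumulator times a persistently squared base) by top-down recursive exponentiation-by-squaring that squares the partial result for the halved exponent and multiplies in the base on odd exponents.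
import Mathlib
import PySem

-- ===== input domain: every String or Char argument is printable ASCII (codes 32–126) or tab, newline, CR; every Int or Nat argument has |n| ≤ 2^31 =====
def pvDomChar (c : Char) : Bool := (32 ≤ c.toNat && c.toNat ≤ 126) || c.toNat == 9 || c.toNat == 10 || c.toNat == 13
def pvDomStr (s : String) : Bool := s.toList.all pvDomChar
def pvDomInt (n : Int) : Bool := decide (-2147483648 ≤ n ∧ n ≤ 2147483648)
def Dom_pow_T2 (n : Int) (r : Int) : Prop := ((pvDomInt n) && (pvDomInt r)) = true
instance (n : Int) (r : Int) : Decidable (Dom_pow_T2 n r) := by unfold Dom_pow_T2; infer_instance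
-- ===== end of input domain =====

-- B replaces A's iterative bit loop by top-down recursive exponentiation-by-squaring
-- of the result (objective: alternative decomposition, same asymptotic cost).

-- ===== PORT A =====
-- the while loop of A as recursion on n; `n & 1` is `mod n 2 = 1` and `n >> 1` is
-- `floordiv n 2` (exact: Python's & 1 and >> 1 on ints are floor mod/div by 2)
def pow_T2_loop (n a b ca cb r : Int) : Int × Int :=
  if h : 0 < n then
    let ab : Int × Int :=
      if PySem.Int.mod n 2 = 1 then
        (PySem.Int.mod (a*ca + 2*b*cb) r, PySem.Int.mod (a*cb + b*ca) r)
      else (a, b)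
    pow_T2_loop (PySem.Int.floordiv n 2) ab.1 ab.2
      (PySem.Int.mod (ca*ca + 2*cb*cb) r) (PySem.Int.mod (2*ca*cb) r) r
  else (a, b)
termination_by n.toNat
decreasing_by
  have h2 : PySem.Int.floordiv n 2 = n / 2 := PySem.Int.floordiv_eq_ediv_of_pos (by omega)
  rw [h2]; omega

def pow_T2 (n : Int) (r : Int) : Int × Int :=
  pow_T2_loop n 1 0 (PySem.Int.mod 3 r) (PySem.Int.mod 2 r) r

-- ===== PORT B =====
def pow_T2_alt (n : Int) (r : Int) : Int × Int :=
  if h : n ≤ 0 then (1, 0)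
  else
    let p := pow_T2_alt (PySem.Int.floordiv n 2) r
    let sa := PySem.Int.mod (p.1*p.1 + 2*p.2*p.2) r
    let sb := PySem.Int.mod (2*p.1*p.2) r
    if PySem.Int.mod n 2 = 1 then
      let ba := PySem.Int.mod 3 r
      let bb := PySem.Int.mod 2 r
      (PySem.Int.mod (sa*ba + 2*sb*bb) r, PySem.Int.mod (sa*bb + sb*ba) r)
    else (sa, sb)
termination_by n.toNat
decreasing_by
  have h2 : PySem.Int.floordiv n 2 = n / 2 := PySem.Int.floordiv_eq_ediv_of_pos (by omega)
  rw [h2]; omega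

-- ===== PRECONDITION & SPEC =====
-- Python's `%` raises ZeroDivisionError when r == 0 (A computes 3 % r unconditionally)
def Pre_pow_T2 (n : Int) (r : Int) : Prop := r ≠ 0
instance (n : Int) (r : Int) : Decidable (Pre_pow_T2 n r) := by unfold Pre_pow_T2; infer_instance
def pvWitness_pow_T2 : Int × Int := (5, 7)

def Spec_pow_T2 (n : Int) (r : Int) (out : Int × Int) : Prop := out = pow_T2_alt n r
instance (n : Int) (r : Int) (out : Int × Int) : Decidable (Spec_pow_T2 n r out) := by unfold Spec_pow_T2; infer_instance

-- ===== CLAIM (what is proved, stated in full; the proofs are below) =====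
def Claim_equal_pow_T2 : Prop := ∀ (n : Int) (r : Int), Dom_pow_T2 n r → Pre_pow_T2 n r → Spec_pow_T2 n r (pow_T2 n r)

-- ===== LEMMAS AND PROOFS =====

-- multiplication and powers in Z[√2], unreduced (reference semantics)
def wmul (p q : Int × Int) : Int × Int := (p.1*q.1 + 2*p.2*q.2, p.1*q.2 + p.2*q.1)

def wpow (c : Int × Int) : Nat → Int × Int
  | 0 => (1, 0)
  | k+1 => wmul c (wpow c k)

lemma wmul_comm (p q : Int × Int) : wmul p q = wmul q p := by
  simp only [wmul, Prod.mk.injEq]; constructor <;> ring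

lemma wmul_assoc (p q s : Int × Int) : wmul (wmul p q) s = wmul p (wmul q s) := by
  simp only [wmul, Prod.mk.injEq]; constructor <;> ring

lemma one_wmul (p : Int × Int) : wmul (1, 0) p = p := by
  cases p with
  | mk x y => simp only [wmul, Prod.mk.injEq]; constructor <;> ring

lemma wpow_add (c : Int × Int) (i j : Nat) : wpow c (i + j) = wmul (wpow c i) (wpow c j) := by
  induction i with
  | zero => simp [wpow, one_wmul]
  | succ i ih =>
      have : i + 1 + j = (i + j) + 1 := by omega
      rw [this, wpow, wpow, ih, ← wmul_assoc]

lemma wpow_sq (c : Int × Int) (k : Nat) : wpow (wmul c c) k = wpow c (2 * k) := by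
  induction k with
  | zero => rfl
  | succ k ih =>
      have h2 : 2 * (k + 1) = (2 * k + 1) + 1 := by omega
      rw [wpow, ih, h2, wpow, wpow, ← wmul_assoc]

-- congruence toolkit for Python's floor mod (PySem.Int.mod = Int.fmod)
lemma pmod_def (x r : Int) : PySem.Int.mod x r = Int.fmod x r := rfl

lemma pmod_idem (x r : Int) : Int.fmod (Int.fmod x r) r = Int.fmod x r :=
  Int.fmod_fmod_of_dvd x dvd_rfl

lemma fmod_add_congr {r x x' y y' : Int} (hx : Int.fmod x r = Int.fmod x' r)
    (hy : Int.fmod y r = Int.fmod y' r) : Int.fmod (x + y) r = Int.fmod (x' + y') r := by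
  rw [Int.add_fmod, hx, hy, ← Int.add_fmod]

lemma fmod_mul_congr {r x x' y y' : Int} (hx : Int.fmod x r = Int.fmod x' r)
    (hy : Int.fmod y r = Int.fmod y' r) : Int.fmod (x * y) r = Int.fmod (x' * y') r := by
  rw [Int.mul_fmod, hx, hy, ← Int.mul_fmod]

-- the two components of a reduced wmul depend only on the residues of the factors
lemma fmod_mulfst_congr {r a a' b b' c c' d d' : Int}
    (ha : Int.fmod a r = Int.fmod a' r) (hb : Int.fmod b r = Int.fmod b' r)
    (hc : Int.fmod c r = Int.fmod c' r) (hd : Int.fmod d r = Int.fmod d' r) :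
    Int.fmod (a*c + 2*b*d) r = Int.fmod (a'*c' + 2*b'*d') r :=
  fmod_add_congr (fmod_mul_congr ha hc)
    (fmod_mul_congr (fmod_mul_congr rfl hb) hd)

lemma fmod_mulsnd_congr {r a a' b b' c c' d d' : Int}
    (ha : Int.fmod a r = Int.fmod a' r) (hb : Int.fmod b r = Int.fmod b' r)
    (hc : Int.fmod c r = Int.fmod c' r) (hd : Int.fmod d r = Int.fmod d' r) :
    Int.fmod (a*d + b*c) r = Int.fmod (a'*d' + b'*c') r :=
  fmod_add_congr (fmod_mul_congr ha hd) (fmod_mul_congr hb hc)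

-- arithmetic facts about halving a positive n
lemma half_split {n : Int} (hn : 0 < n) :
    PySem.Int.floordiv n 2 * 2 + PySem.Int.mod n 2 = n ∧
    (PySem.Int.mod n 2 = 0 ∨ PySem.Int.mod n 2 = 1) ∧ 0 ≤ PySem.Int.floordiv n 2 := by
  have h1 := PySem.Int.floordiv_mul_add_mod n 2
  have h2 := PySem.Int.mod_nonneg n (by norm_num : (0:Int) < 2)
  have h3 := PySem.Int.mod_lt n (by norm_num : (0:Int) < 2)
  exact ⟨h1, by omega, by omega⟩

-- A's loop computes the reduced wmul of the accumulator with the n-th wpow of the base,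
-- for any integers congruent (mod r) to the abstract accumulator P and base C.
lemma loopA (r : Int) : ∀ (k : Nat) (n : Int), n.toNat ≤ k → 0 < n →
    ∀ (a b ca cb : Int) (P C : Int × Int),
    Int.fmod a r = Int.fmod P.1 r → Int.fmod b r = Int.fmod P.2 r →
    Int.fmod ca r = Int.fmod C.1 r → Int.fmod cb r = Int.fmod C.2 r →
    pow_T2_loop n a b ca cb r =
      (Int.fmod (wmul P (wpow C n.toNat)).1 r, Int.fmod (wmul P (wpow C n.toNat)).2 r) := by
  intro k
  induction k with
  | zero => intro n hk hn; omega
  | succ k ih =>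
      intro n hk hn a b ca cb P C ha hb hc hd
      obtain ⟨hsplit, hpar, hm0⟩ := half_split hn
      set m := PySem.Int.floordiv n 2 with hm
      rw [pow_T2_loop, dif_pos hn]
      by_cases hmpos : 0 < m
      · -- n ≥ 2: recurse via the induction hypothesis on m
        have hmk : m.toNat ≤ k := by omega
        have hsq1 : Int.fmod (PySem.Int.mod (ca*ca + 2*cb*cb) r) r
            = Int.fmod (wmul C C).1 r := by
          rw [pmod_def, pmod_idem]; exact fmod_mulfst_congr hc hd hc hd
        have hsq2 : Int.fmod (PySem.Int.mod (2*ca*cb) r) r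
            = Int.fmod (wmul C C).2 r := by
          rw [pmod_def, pmod_idem]
          have : (2*ca*cb : Int) = ca*cb + cb*ca := by ring
          rw [this]
          have : ((wmul C C).2 : Int) = C.1*C.2 + C.2*C.1 := rfl
          rw [this]
          exact fmod_mulsnd_congr hc hd hc hd
        rcases hpar with heven | hodd
        · -- even bit: accumulator unchanged
          rw [if_neg (by rw [heven]; norm_num)]
          rw [ih m hmk hmpos _ _ _ _ P (wmul C C) ha hb hsq1 hsq2]
          have hn2 : n.toNat = 2 * m.toNat := by omega
          rw [wpow_sq, ← hn2]
        · -- odd bit: multiply the accumulator by C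
          rw [if_pos hodd]
          have ha' : Int.fmod (PySem.Int.mod (a*ca + 2*b*cb) r) r
              = Int.fmod (wmul P C).1 r := by
            rw [pmod_def, pmod_idem]; exact fmod_mulfst_congr ha hb hc hd
          have hb' : Int.fmod (PySem.Int.mod (a*cb + b*ca) r) r
              = Int.fmod (wmul P C).2 r := by
            rw [pmod_def, pmod_idem]; exact fmod_mulsnd_congr ha hb hc hd
          rw [ih m hmk hmpos _ _ _ _ (wmul P C) (wmul C C) ha' hb' hsq1 hsq2]
          have hn2 : n.toNat = 2 * m.toNat + 1 := by omega
          rw [wpow_sq, hn2]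
          have : wmul (wmul P C) (wpow C (2 * m.toNat)) = wmul P (wpow C (2 * m.toNat + 1)) := by
            rw [wpow, ← wmul_assoc]
          rw [this]
      · -- n = 1: last iteration, the recursive call returns immediately
        have hn1 : n = 1 := by omega
        subst hn1
        rw [if_pos (by decide)]
        rw [pow_T2_loop, dif_neg (by decide)]
        have h1 : (1:Int).toNat = 1 := rfl
        rw [h1, wpow, wpow]
        have hz : wmul C (1, 0) = C := by rw [wmul_comm, one_wmul]
        rw [hz]
        exact Prod.ext (fmod_mulfst_congr ha hb hc hd) (fmod_mulsnd_congr ha hb hc hd)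

-- B computes the reduced n-th wpow of the base (3, 2)
lemma altB (r : Int) : ∀ (k : Nat) (n : Int), n.toNat ≤ k → 0 < n →
    pow_T2_alt n r =
      (Int.fmod (wpow (3, 2) n.toNat).1 r, Int.fmod (wpow (3, 2) n.toNat).2 r) := by
  intro k
  induction k with
  | zero => intro n hk hn; omega
  | succ k ih =>
      intro n hk hn
      obtain ⟨hsplit, hpar, hm0⟩ := half_split hn
      set m := PySem.Int.floordiv n 2 with hm
      rw [pow_T2_alt, dif_neg (by omega)]
      rw [← hm]
      -- the recursive value p is congruent (mod r) componentwise to wpow (3,2) m.toNat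
      have hp : Int.fmod (pow_T2_alt m r).1 r = Int.fmod (wpow (3, 2) m.toNat).1 r ∧
          Int.fmod (pow_T2_alt m r).2 r = Int.fmod (wpow (3, 2) m.toNat).2 r := by
        by_cases hmpos : 0 < m
        · rw [ih m (by omega) hmpos]; exact ⟨pmod_idem _ r, pmod_idem _ r⟩
        · have hm' : m = 0 := by omega
          rw [pow_T2_alt, dif_pos (by omega)]
          have : m.toNat = 0 := by omega
          rw [this]; exact ⟨rfl, rfl⟩
      have hsq1 : PySem.Int.mod ((pow_T2_alt m r).1*(pow_T2_alt m r).1 +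
          2*(pow_T2_alt m r).2*(pow_T2_alt m r).2) r
          = Int.fmod (wmul (wpow (3,2) m.toNat) (wpow (3,2) m.toNat)).1 r := by
        rw [pmod_def]; exact fmod_mulfst_congr hp.1 hp.2 hp.1 hp.2
      have hsq2 : PySem.Int.mod (2*(pow_T2_alt m r).1*(pow_T2_alt m r).2) r
          = Int.fmod (wmul (wpow (3,2) m.toNat) (wpow (3,2) m.toNat)).2 r := by
        rw [pmod_def]
        have h2 : (2*(pow_T2_alt m r).1*(pow_T2_alt m r).2 : Int)
            = (pow_T2_alt m r).1*(pow_T2_alt m r).2 + (pow_T2_alt m r).2*(pow_T2_alt m r).1 := by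
          ring
        rw [h2]
        have h3 : ((wmul (wpow (3,2) m.toNat) (wpow (3,2) m.toNat)).2 : Int)
            = (wpow (3,2) m.toNat).1*(wpow (3,2) m.toNat).2
              + (wpow (3,2) m.toNat).2*(wpow (3,2) m.toNat).1 := rfl
        rw [h3]
        exact fmod_mulsnd_congr hp.1 hp.2 hp.1 hp.2
      have hsq : wmul (wpow (3,2) m.toNat) (wpow (3,2) m.toNat) = wpow (3,2) (2 * m.toNat) := by
        rw [two_mul, wpow_add]
      rw [hsq] at hsq1 hsq2
      have hsq1c : Int.fmod (PySem.Int.mod ((pow_T2_alt m r).1*(pow_T2_alt m r).1 +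
          2*(pow_T2_alt m r).2*(pow_T2_alt m r).2) r) r
          = Int.fmod (wpow (3,2) (2 * m.toNat)).1 r := by rw [hsq1, pmod_idem]
      have hsq2c : Int.fmod (PySem.Int.mod (2*(pow_T2_alt m r).1*(pow_T2_alt m r).2) r) r
          = Int.fmod (wpow (3,2) (2 * m.toNat)).2 r := by rw [hsq2, pmod_idem]
      have hbase1 : Int.fmod (PySem.Int.mod 3 r) r = Int.fmod (3:Int) r := pmod_idem 3 r
      have hbase2 : Int.fmod (PySem.Int.mod 2 r) r = Int.fmod (2:Int) r := pmod_idem 2 r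
      rcases hpar with heven | hodd
      · rw [if_neg (by rw [heven]; norm_num)]
        have hn2 : n.toNat = 2 * m.toNat := by omega
        rw [hn2]
        exact Prod.ext hsq1 hsq2
      · rw [if_pos hodd]
        have hn2 : n.toNat = 2 * m.toNat + 1 := by omega
        rw [hn2]
        have hstep : wpow (3,2) (2 * m.toNat + 1) = wmul (wpow (3,2) (2 * m.toNat)) ((3:Int), (2:Int)) := by
          rw [wpow, wmul_comm]
        rw [hstep]
        exact Prod.ext (fmod_mulfst_congr hsq1c hsq2c hbase1 hbase2)
          (fmod_mulsnd_congr hsq1c hsq2c hbase1 hbase2)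

-- ===== VERDICT (by name: the statement is the Claim_ definition above) =====
theorem pow_T2_spec : Claim_equal_pow_T2 := by
  intro n r _ _
  unfold Spec_pow_T2 pow_T2
  by_cases hn : 0 < n
  · have hA := loopA r n.toNat n le_rfl hn 1 0 (PySem.Int.mod 3 r) (PySem.Int.mod 2 r)
      ((1:Int), (0:Int)) ((3:Int), (2:Int)) rfl rfl (pmod_idem 3 r) (pmod_idem 2 r)
    rw [hA, altB r n.toNat n le_rfl hn, one_wmul]
  · rw [pow_T2_loop, dif_neg hn, pow_T2_alt, dif_pos (by omega)]
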